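-- pv_equiv track=rewrite | github.com/adderan/bme205 | hw3/markov.py | is_valid_kmer
-- ===== SOURCE A (Python) =====
-- def is_valid_kmer(kmer, include_start_kmer):
-- 	"""Checks whether the provided kmer meets the following conditions:
-- 	1) The '$' character does not appear before any character except '$'
-- 	2) The '^' character does not appear after any character except '^'
-- 	3) If include_start_kmer is False, the kmer does not consist of only ^ characters.
-- 	If all the conditions are met, returns True. Otherwise returns false.
-- 	"""
--
-- 	#In mode 0, ^ characters are expected, and other characters trigger a switch to the
-- 	#appropriate mode. In mode 1, sequence characters are expected, and ^ characters indicate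
-- 	#an invalid kmer since the sequence has already started. In mode 2, $ characters are expected
-- 	#and any other character indicates an invalid kmer, since the sequence has ended.
-- 	mode = 0
-- 	valid_kmer = True
-- 	for character in kmer:
-- 		if mode == 0:
-- 			if character == '$':
-- 				mode = 2
-- 			elif character != '^':
-- 				mode = 1
-- 		if mode == 1:
-- 			if character == '$':
-- 				mode = 2
-- 			elif character == '^':
-- 				valid_kmer = False
-- 		if mode == 2:
-- 			if character != '$':
-- 				valid_kmer = False
-- 	#if mode is still zero, the kmer only has ^ characters
-- 	if not include_start_kmer and mode == 0:
-- 		valid_kmer = False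
-- 	return valid_kmer
-- ===== SOURCE B (Python) =====
-- def is_valid_kmer(kmer, include_start_kmer):
--     """Phased check: strip the leading carets; the rest must contain no '^',
--     and all '$' in it must form a pure suffix. All-caret (or empty) kmers are
--     governed solely by include_start_kmer."""
--     rest = kmer.lstrip('^')
--     if not rest:
--         return bool(include_start_kmer)
--     body = rest.rstrip('$')
--     return '^' not in rest and '$' not in body
-- ===== Notes on version B (the rewrite author's own statement) =====
-- stated objective: simpler
-- what changed: Replaced the three-mode state-machine loop by phased string operations: strip the leading carets, then the kmer is valid iff the rest contains no '^' and all '$' in it form a pure suffix, with the all-caret/empty case governed solely by include_start_kmer.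
import Mathlib
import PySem

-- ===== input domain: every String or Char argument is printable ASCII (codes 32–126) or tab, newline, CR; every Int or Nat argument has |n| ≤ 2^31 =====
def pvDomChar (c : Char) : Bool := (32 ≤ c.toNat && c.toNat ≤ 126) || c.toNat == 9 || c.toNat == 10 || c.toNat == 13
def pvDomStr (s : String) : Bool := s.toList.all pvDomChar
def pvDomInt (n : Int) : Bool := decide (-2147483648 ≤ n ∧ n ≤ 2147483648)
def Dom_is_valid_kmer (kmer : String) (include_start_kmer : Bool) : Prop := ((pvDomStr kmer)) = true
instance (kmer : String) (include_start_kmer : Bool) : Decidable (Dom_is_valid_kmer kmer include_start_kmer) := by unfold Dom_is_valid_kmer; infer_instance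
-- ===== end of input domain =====

-- B replaces A's three-mode state machine by phased string operations (strip the
-- leading carets, then check '^' is absent and all '$' form a pure suffix): simpler.

-- ===== PORT A =====
-- one loop iteration of A: the three sequential `if` blocks on (mode, valid)
def pvStepA (p : Nat × Bool) (character : Char) : Nat × Bool :=
  let p := if p.1 == 0 then
      (if character == '$' then (2, p.2) else if character != '^' then (1, p.2) else p)
    else p
  let p := if p.1 == 1 then
      (if character == '$' then (2, p.2) else if character == '^' then (p.1, false) else p)
    else p
  if p.1 == 2 then (if character != '$' then (p.1, false) else p) else p

def is_valid_kmer (kmer : String) (include_start_kmer : Bool) : Bool :=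
  let r := kmer.toList.foldl pvStepA (0, true)
  if !include_start_kmer && r.1 == 0 then false else r.2

-- ===== PORT B =====
def is_valid_kmer_alt (kmer : String) (include_start_kmer : Bool) : Bool :=
  -- rest = kmer.lstrip('^'): exact on code points as dropWhile
  let rest := kmer.toList.dropWhile (· == '^')
  if rest.isEmpty then include_start_kmer
  else
    -- body = rest.rstrip('$'): exact on code points as reverse/dropWhile/reverse
    let body := (rest.reverse.dropWhile (· == '$')).reverse
    -- '^' not in rest and '$' not in body (single-character membership)
    !rest.contains '^' && !body.contains '$'

-- ===== PRECONDITION & SPEC =====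
def Spec_is_valid_kmer (kmer : String) (include_start_kmer : Bool) (out : Bool) : Prop := out = is_valid_kmer_alt kmer include_start_kmer
instance (kmer : String) (include_start_kmer : Bool) (out : Bool) : Decidable (Spec_is_valid_kmer kmer include_start_kmer out) := by unfold Spec_is_valid_kmer; infer_instance

-- ===== CLAIM (what is proved, stated in full; the proofs are below) =====
def Claim_equal_is_valid_kmer : Prop := ∀ (kmer : String) (include_start_kmer : Bool), Dom_is_valid_kmer kmer include_start_kmer → Spec_is_valid_kmer kmer include_start_kmer (is_valid_kmer kmer include_start_kmer)

-- ===== LEMMAS AND PROOFS =====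

-- what A's loop computes from mode 1: no '^' before the first '$', only '$' after it
def pvP1 (l : List Char) : Bool :=
  !((l.takeWhile (· != '$')).contains '^') && (l.dropWhile (· != '$')).all (· == '$')

-- rstrip('$') as used by B's port
def pvRS (l : List Char) : List Char := (l.reverse.dropWhile (· == '$')).reverse

theorem pvStepA_one_dollar (v : Bool) : pvStepA (1, v) '$' = (2, v) := by
  simp [pvStepA]

theorem pvStepA_one_caret (v : Bool) : pvStepA (1, v) '^' = (1, false) := by
  simp [pvStepA]

theorem pvStepA_one_other (v : Bool) (c : Char) (h1 : c ≠ '$') (h2 : c ≠ '^') :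
    pvStepA (1, v) c = (1, v) := by
  simp [pvStepA, h1, h2]

theorem pvP1_cons_dollar (l : List Char) : pvP1 ('$' :: l) = l.all (· == '$') := by
  simp [pvP1]

theorem pvP1_cons_caret (l : List Char) : pvP1 ('^' :: l) = false := by
  simp [pvP1]

theorem pvP1_cons_other (c : Char) (l : List Char) (h1 : c ≠ '$') (h2 : c ≠ '^') :
    pvP1 (c :: l) = pvP1 l := by
  simp [pvP1, h1, Ne.symm h2]

theorem pvP1_of_all (l : List Char) (h : l.all (· == '$')) : pvP1 l = true := by
  cases l with
  | nil => simp [pvP1]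
  | cons c l =>
    simp only [List.all_cons, Bool.and_eq_true, beq_iff_eq] at h
    rw [h.1, pvP1_cons_dollar]
    exact List.all_eq_true.2 fun x hx => List.all_eq_true.1 h.2 x hx

theorem pv_fold2 (l : List Char) (v : Bool) :
    l.foldl pvStepA (2, v) = (2, v && l.all (· == '$')) := by
  induction l generalizing v with
  | nil => simp
  | cons c l ih =>
    by_cases hc : c = '$' <;>
      simp [pvStepA, hc, List.foldl_cons, ih]

theorem pv_fold1_snd (l : List Char) (v : Bool) :
    (l.foldl pvStepA (1, v)).2 = (v && pvP1 l) := by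
  induction l generalizing v with
  | nil => simp [pvP1]
  | cons c l ih =>
    by_cases h1 : c = '$'
    · subst h1
      rw [List.foldl_cons, pvStepA_one_dollar, pv_fold2, pvP1_cons_dollar]
    · by_cases h2 : c = '^'
      · subst h2
        rw [List.foldl_cons, pvStepA_one_caret, ih, pvP1_cons_caret]
        simp
      · rw [List.foldl_cons, pvStepA_one_other v c h1 h2, ih, pvP1_cons_other c l h1 h2]

theorem pv_fold1_fst (l : List Char) (v : Bool) :
    (l.foldl pvStepA (1, v)).1 ≠ 0 := by
  induction l generalizing v with
  | nil => simp
  | cons c l ih =>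
    by_cases h1 : c = '$'
    · simp [h1, List.foldl_cons, pvStepA_one_dollar, pv_fold2]
    · by_cases h2 : c = '^'
      · simpa [h2, List.foldl_cons, pvStepA_one_caret] using ih false
      · simpa [List.foldl_cons, pvStepA_one_other v c h1 h2] using ih v

theorem pv_fold0 (l : List Char) (v : Bool) :
    l.foldl pvStepA (0, v) =
      if l.all (· == '^') then (0, v) else (l.dropWhile (· == '^')).foldl pvStepA (1, v) := by
  induction l generalizing v with
  | nil => simp
  | cons c l ih =>
    by_cases h2 : c = '^'
    · simpa [pvStepA, h2, List.foldl_cons, List.dropWhile_cons] using ih v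
    · have hstep : pvStepA (0, v) c = pvStepA (1, v) c := by
        by_cases h1 : c = '$' <;> simp [pvStepA, h1, h2]
      simp [h2, List.foldl_cons, hstep]

theorem pv_rs_nil_of_all (l : List Char) (h : l.all (· == '$')) : pvRS l = [] := by
  unfold pvRS
  rw [List.dropWhile_eq_nil_iff.2]
  · simp
  · intro x hx
    exact List.all_eq_true.1 h x (List.mem_reverse.1 hx)

theorem pv_rs_cons_of_not_all (c : Char) (l : List Char) (h : ¬ l.all (· == '$')) :
    pvRS (c :: l) = c :: pvRS l := by
  unfold pvRS
  have hne : (l.reverse.dropWhile (· == '$')).isEmpty = false := by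
    rw [List.isEmpty_eq_false_iff, Ne, List.dropWhile_eq_nil_iff]
    intro hall
    exact h (List.all_eq_true.2 fun x hx => hall x (List.mem_reverse.2 hx))
  rw [show (c :: l).reverse = l.reverse ++ [c] by simp, List.dropWhile_append, hne]
  simp

theorem pv_rs_cons_of_all (c : Char) (l : List Char) (hc : c ≠ '$')
    (h : l.all (· == '$')) : pvRS (c :: l) = [c] := by
  unfold pvRS
  have hnil : l.reverse.dropWhile (· == '$') = [] :=
    List.dropWhile_eq_nil_iff.2 fun x hx => List.all_eq_true.1 h x (List.mem_reverse.1 hx)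
  rw [show (c :: l).reverse = l.reverse ++ [c] by simp, List.dropWhile_append, hnil]
  simp [hc]

theorem pv_main (l : List Char) :
    pvP1 l = (!l.contains '^' && !(pvRS l).contains '$') := by
  induction l with
  | nil => simp [pvP1, pvRS]
  | cons c l ih =>
    by_cases h2 : c = '^'
    · subst h2
      rw [pvP1_cons_caret]
      simp
    · by_cases h1 : c = '$'
      · subst h1
        rw [pvP1_cons_dollar]
        by_cases hall : l.all (· == '$')
        · rw [pv_rs_nil_of_all ('$' :: l) (by simp [hall]), hall]
          have hnc : '^' ∉ l := fun hm => by
            have := List.all_eq_true.1 hall _ hm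
            simp at this
          simp [hnc]
        · rw [pv_rs_cons_of_not_all '$' l hall]
          simp [hall]
      · by_cases hall : l.all (· == '$')
        · rw [pvP1_cons_other c l h1 h2, pvP1_of_all l hall, pv_rs_cons_of_all c l h1 hall]
          have hnc : '^' ∉ l := fun hm => by
            have := List.all_eq_true.1 hall _ hm
            simp at this
          simp [hnc, Ne.symm h1, Ne.symm h2]
        · rw [pvP1_cons_other c l h1 h2, pv_rs_cons_of_not_all c l hall, ih]
          simp [Ne.symm h1, Ne.symm h2]

-- ===== VERDICT (by name: the statement is the Claim_ definition above) =====
theorem is_valid_kmer_spec : Claim_equal_is_valid_kmer := by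
  intro kmer inc _
  unfold Spec_is_valid_kmer is_valid_kmer is_valid_kmer_alt
  set l := kmer.toList with hl
  by_cases hall : l.all (· == '^')
  · have hrest : l.dropWhile (· == '^') = [] :=
      List.dropWhile_eq_nil_iff.2 (List.all_eq_true.1 hall)
    rw [pv_fold0, if_pos hall]
    simp only [hrest, List.isEmpty_nil, if_true]
    cases inc <;> rfl
  · have hrest : (l.dropWhile (· == '^')).isEmpty = false := by
      rw [List.isEmpty_eq_false_iff, Ne, List.dropWhile_eq_nil_iff]
      intro h; exact hall (List.all_eq_true.2 h)
    rw [pv_fold0, if_neg hall]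
    simp only [hrest, Bool.false_eq_true, if_false, pv_fold1_snd, Bool.true_and]
    have h0 := pv_fold1_fst (l.dropWhile (· == '^')) true
    rw [pv_main]
    simp [show (((l.dropWhile (· == '^')).foldl pvStepA (1, true)).1 == 0) = false by
      simpa using h0, pvRS]
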